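-- pv_equiv track=rewrite | github.com/Groovy52/Data-Structure-and-Algorithm | Algorithm/CP06_Searching-Algorithms/CP06-01_Bruit-Force-Algorithm/CP06-01-01_Iteration/! B_26169_S3_Eat an apple within three times.py | solution
-- ===== SOURCE A (Python) =====
-- def solution(board, r, c):
--     dd = [[-1,0],[1,0],[0,-1],[0,1]]
--
--     for i in range(4):
--         r1, c1 = r+dd[i][0], c+dd[i][1]
--         if not(0<=r1<5 and 0<=c1<5) or board[r1][c1]==-1:
--             continue
--
--         b1 = [row[:] for row in board]
--
--         get_apple1 = 1 if b1[r1][c1] == 1 else 0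
--
--         b1[r][c] = -1
--
--         for j in range(4):
--             r2, c2 = r1+dd[j][0], c1+dd[j][1]
--             if not(0<=r2<5 and 0<=c2<5) or b1[r2][c2]==-1:
--                 continue
--
--             b2 = [row[:] for row in b1]
--
--             get_apple2 = get_apple1 + (1 if b2[r2][c2] == 1 else 0)
--
--             b2[r1][c1] = -1
--
--             if get_apple2 >= 2:
--                 return 1
--
--             for k in range(4):
--                 r3, c3 = r2+dd[k][0], c2+dd[k][1]
--
--                 if not(0<=r3<5 and 0<=c3<5) or b2[r3][c3]==-1:
--                     continue
--
--                 get_apple3 = get_apple2 + (1 if b2[r3][c3] == 1 else 0)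
--
--                 if get_apple3 >= 2:
--                     return 1
--     return 0
-- ===== SOURCE B (Python) =====
-- def solution(board, r, c):
--     dd = ((-1, 0), (1, 0), (0, -1), (0, 1))
--
--     def dfs(r, c, steps_left, apples, visited):
--         for dr, dc in dd:
--             nr, nc = r + dr, c + dc
--             if not (0 <= nr < 5 and 0 <= nc < 5):
--                 continue
--             if board[nr][nc] == -1 or (nr, nc) in visited:
--                 continue
--             na = apples + (1 if board[nr][nc] == 1 else 0)
--             if na >= 2:
--                 return True
--             if steps_left > 1 and dfs(nr, nc, steps_left - 1, na, visited | {(r, c)}):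
--                 return True
--         return False
--
--     return 1 if dfs(r, c, 3, 0, frozenset()) else 0
-- ===== Notes on version B (the rewrite author's own statement) =====
-- stated objective: simpler
-- what changed: Replaced A's three hand-unrolled nested loops with per-level board copies and in-place -1 marking by a single recursive depth-limited DFS helper that never copies or mutates the board and tracks forbidden cells in a visited set.
-- outside the precondition, e.g. on solution([[0, 1], [0, 0], [-1, 1], [0, -1], [-1, 1]], 0, -1): A returns 0, B raises IndexError
import Mathlib
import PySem

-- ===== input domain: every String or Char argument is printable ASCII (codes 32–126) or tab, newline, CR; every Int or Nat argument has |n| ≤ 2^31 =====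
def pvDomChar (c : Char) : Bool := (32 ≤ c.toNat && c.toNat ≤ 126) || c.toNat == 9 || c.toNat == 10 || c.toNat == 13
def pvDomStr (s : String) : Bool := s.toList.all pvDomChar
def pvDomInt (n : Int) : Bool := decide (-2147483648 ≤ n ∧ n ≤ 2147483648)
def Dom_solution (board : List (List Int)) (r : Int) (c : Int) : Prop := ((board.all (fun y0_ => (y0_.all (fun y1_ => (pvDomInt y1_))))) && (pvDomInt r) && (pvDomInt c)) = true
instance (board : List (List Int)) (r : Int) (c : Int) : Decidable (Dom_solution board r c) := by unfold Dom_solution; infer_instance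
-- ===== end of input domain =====

-- B replaces A's three hand-unrolled nested loops (with per-level board copies and
-- in-place -1 marking) by one recursive depth-limited DFS over a visited set: simpler,
-- no board copies, no mutation.


-- ===== PORT A =====
-- the direction table dd
def ddA : List (Int × Int) := [(-1, 0), (1, 0), (0, -1), (0, 1)]

-- board[i][j]: exact for 0 ≤ i, j in range, which Pre_'s grid guards guarantee at every access
def cellA (b : List (List Int)) (i j : Int) : Int := (b.getD i.toNat []).getD j.toNat 0

-- b[i][j] = v: exact for 0 ≤ i, j in range (Pre_ guarantees this at every assignment A performs)
def setCellA (b : List (List Int)) (i j : Int) (v : Int) : List (List Int) :=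
  b.set i.toNat ((b.getD i.toNat []).set j.toNat v)

-- innermost k-loop of A
def loopK (b2 : List (List Int)) (r2 c2 g2 : Int) : List (Int × Int) → Bool
  | [] => false
  | (dr, dc) :: ds =>
    let r3 := r2 + dr
    let c3 := c2 + dc
    if ¬(0 ≤ r3 ∧ r3 < 5 ∧ 0 ≤ c3 ∧ c3 < 5) ∨ cellA b2 r3 c3 = -1 then loopK b2 r2 c2 g2 ds
    else if 2 ≤ g2 + (if cellA b2 r3 c3 = 1 then 1 else 0) then true
    else loopK b2 r2 c2 g2 ds

-- middle j-loop of A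
def loopJ (b1 : List (List Int)) (r1 c1 g1 : Int) : List (Int × Int) → Bool
  | [] => false
  | (dr, dc) :: ds =>
    let r2 := r1 + dr
    let c2 := c1 + dc
    if ¬(0 ≤ r2 ∧ r2 < 5 ∧ 0 ≤ c2 ∧ c2 < 5) ∨ cellA b1 r2 c2 = -1 then loopJ b1 r1 c1 g1 ds
    else
      let b2 := b1  -- b2 = [row[:] for row in b1]: a value copy is the identity here
      let g2 := g1 + (if cellA b2 r2 c2 = 1 then 1 else 0)
      let b2' := setCellA b2 r1 c1 (-1)
      if 2 ≤ g2 then true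
      else if loopK b2' r2 c2 g2 ddA then true
      else loopJ b1 r1 c1 g1 ds

-- outer i-loop of A
def loopI (board : List (List Int)) (r c : Int) : List (Int × Int) → Bool
  | [] => false
  | (dr, dc) :: ds =>
    let r1 := r + dr
    let c1 := c + dc
    if ¬(0 ≤ r1 ∧ r1 < 5 ∧ 0 ≤ c1 ∧ c1 < 5) ∨ cellA board r1 c1 = -1 then loopI board r c ds
    else
      let b1 := board  -- b1 = [row[:] for row in board]: a value copy is the identity here
      let g1 := if cellA b1 r1 c1 = 1 then 1 else 0
      let b1' := setCellA b1 r c (-1)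
      if loopJ b1' r1 c1 g1 ddA then true
      else loopI board r c ds

def solution (board : List (List Int)) (r : Int) (c : Int) : Int :=
  if loopI board r c ddA then 1 else 0

-- ===== PORT B =====
def ddB : List (Int × Int) := [(-1, 0), (1, 0), (0, -1), (0, 1)]

-- board[i][j]: exact for in-grid indices, the only ones B reads
def cellB (b : List (List Int)) (i j : Int) : Int := (b.getD i.toNat []).getD j.toNat 0

-- recursive depth-limited DFS; the last argument is the remaining direction list of the current level
def dfsB (board : List (List Int)) (steps : Nat) (r c apples : Int)
    (visited : List (Int × Int)) : List (Int × Int) → Bool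
  | [] => false
  | (dr, dc) :: ds =>
    if 0 ≤ r + dr ∧ r + dr < 5 ∧ 0 ≤ c + dc ∧ c + dc < 5 ∧
        cellB board (r + dr) (c + dc) ≠ -1 ∧ ¬ ((r + dr, c + dc) ∈ visited) then
      if 2 ≤ apples + (if cellB board (r + dr) (c + dc) = 1 then 1 else 0) then true
      else if h : 1 < steps then
        if dfsB board (steps - 1) (r + dr) (c + dc)
            (apples + (if cellB board (r + dr) (c + dc) = 1 then 1 else 0))
            ((r, c) :: visited) ddB then true
        else dfsB board steps r c apples visited ds
      else dfsB board steps r c apples visited ds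
    else dfsB board steps r c apples visited ds
  termination_by ds => (steps, ds.length)
  decreasing_by
  all_goals first
    | exact Prod.Lex.left _ _ (by omega)
    | exact Prod.Lex.right _ (by simp)

def solution_alt (board : List (List Int)) (r : Int) (c : Int) : Int :=
  if dfsB board 3 r c 0 [] ddB then 1 else 0

-- ===== PRECONDITION & SPEC =====
-- Pre_ restricts to the game's natural domain: a full 5×5 (or larger) board with an
-- in-grid start — plus any start none of whose four neighbours touches the 5×5 grid,
-- where A returns 0 without reading the board. Outside it A's behaviour (IndexError,
-- negative-index wraparound, partial exploration of an undersized board) is an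
-- accident of its raw indexing.
def Pre_solution (board : List (List Int)) (r : Int) (c : Int) : Prop :=
  (0 ≤ r ∧ r < 5 ∧ 0 ≤ c ∧ c < 5 ∧ 5 ≤ board.length ∧ ∀ row ∈ board.take 5, 5 ≤ row.length)
  ∨ (¬(0 ≤ r - 1 ∧ r - 1 < 5 ∧ 0 ≤ c ∧ c < 5) ∧ ¬(0 ≤ r + 1 ∧ r + 1 < 5 ∧ 0 ≤ c ∧ c < 5)
     ∧ ¬(0 ≤ r ∧ r < 5 ∧ 0 ≤ c - 1 ∧ c - 1 < 5) ∧ ¬(0 ≤ r ∧ r < 5 ∧ 0 ≤ c + 1 ∧ c + 1 < 5))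
instance (board : List (List Int)) (r : Int) (c : Int) : Decidable (Pre_solution board r c) := by
  unfold Pre_solution; infer_instance

def pvWitness_solution : List (List Int) × Int × Int :=
  ([[0, 1, 0, 0, 0], [0, 0, 1, 0, 0], [0, 0, 0, 0, 0], [0, 0, 0, -1, 0], [0, 0, 0, 0, 0]], 0, 0)

def Spec_solution (board : List (List Int)) (r : Int) (c : Int) (out : Int) : Prop := out = solution_alt board r c
instance (board : List (List Int)) (r : Int) (c : Int) (out : Int) : Decidable (Spec_solution board r c out) := by unfold Spec_solution; infer_instance

-- ===== CLAIM (what is proved, stated in full; the proofs are below) =====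
def Claim_equal_solution : Prop := ∀ (board : List (List Int)) (r : Int) (c : Int), Dom_solution board r c → Pre_solution board r c → Spec_solution board r c (solution board r c)

-- ===== LEMMAS AND PROOFS =====

-- the board has at least 5 rows, each of the first five at least 5 wide
def ShapeOK (b : List (List Int)) : Prop :=
  5 ≤ b.length ∧ ∀ k : Nat, k < 5 → 5 ≤ (b.getD k []).length

-- b agrees with board except that the cells of V read -1 (on the 5×5 grid)
def RelV (board : List (List Int)) (V : List (Int × Int)) (b : List (List Int)) : Prop :=
  ∀ x y : Int, 0 ≤ x → x < 5 → 0 ≤ y → y < 5 →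
    cellA b x y = (if (x, y) ∈ V then -1 else cellA board x y)

lemma relV_nil (board : List (List Int)) : RelV board [] board := by
  intro x y _ _ _ _; simp

lemma getD_setCellA (b : List (List Int)) (i j v : Int) (k : Nat) (hib : i.toNat < b.length) :
    (setCellA b i j v).getD k [] =
      if i.toNat = k then (b.getD i.toNat []).set j.toNat v else b.getD k [] := by
  by_cases h : i.toNat = k
  · subst h
    simp [setCellA, List.getD_eq_getElem?_getD, List.getElem?_set_self hib]
  · rw [if_neg h]
    show (b.set i.toNat ((b.getD i.toNat []).set j.toNat v)).getD k [] = b.getD k []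
    rw [List.getD_eq_getElem?_getD, List.getElem?_set_ne h, ← List.getD_eq_getElem?_getD]

lemma shape_set (b : List (List Int)) (i j v : Int) (hi0 : 0 ≤ i) (hi5 : i < 5) (h : ShapeOK b) :
    ShapeOK (setCellA b i j v) := by
  obtain ⟨h1, h2⟩ := h
  refine ⟨by simpa [setCellA] using h1, ?_⟩
  intro k hk
  rw [getD_setCellA b i j v k (by omega)]
  split
  · rw [List.length_set]
    exact h2 i.toNat (by omega)
  · exact h2 k hk

lemma cellA_set (b : List (List Int)) (hb : ShapeOK b) (i j v x y : Int)
    (hi0 : 0 ≤ i) (hi5 : i < 5) (hj0 : 0 ≤ j) (hj5 : j < 5)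
    (hx0 : 0 ≤ x) (hx5 : x < 5) (hy0 : 0 ≤ y) (hy5 : y < 5) :
    cellA (setCellA b i j v) x y = if x = i ∧ y = j then v else cellA b x y := by
  obtain ⟨h1, h2⟩ := hb
  have hib : i.toNat < b.length := by omega
  simp only [cellA]
  rw [getD_setCellA b i j v x.toNat hib]
  by_cases hxi : x = i
  · subst hxi
    rw [if_pos rfl]
    have hjr : j.toNat < (b.getD x.toNat []).length := by
      have := h2 x.toNat (by omega); omega
    by_cases hyj : y = j
    · subst hyj
      show ((b.getD x.toNat []).set y.toNat v).getD y.toNat 0 = _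
      rw [List.getD_eq_getElem?_getD, List.getElem?_set_self hjr]
      simp
    · have hne : j.toNat ≠ y.toNat := by omega
      rw [List.getD_eq_getElem?_getD, List.getElem?_set_ne hne, ← List.getD_eq_getElem?_getD]
      simp [hyj]
  · rw [if_neg (by omega), if_neg (by intro ⟨h', _⟩; exact hxi h')]

lemma relV_set (board : List (List Int)) (V : List (Int × Int)) (b : List (List Int))
    (hb : ShapeOK b) (hrel : RelV board V b) (i j : Int)
    (hi0 : 0 ≤ i) (hi5 : i < 5) (hj0 : 0 ≤ j) (hj5 : j < 5) :
    RelV board ((i, j) :: V) (setCellA b i j (-1)) := by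
  intro x y hx0 hx5 hy0 hy5
  rw [cellA_set b hb i j (-1) x y hi0 hi5 hj0 hj5 hx0 hx5 hy0 hy5]
  by_cases hxy : x = i ∧ y = j
  · obtain ⟨h1', h2'⟩ := hxy; subst h1'; subst h2'; simp
  · rw [if_neg hxy, hrel x y hx0 hx5 hy0 hy5]
    have : ((x, y) ∈ (i, j) :: V) ↔ ((x, y) ∈ V) := by
      simp only [List.mem_cons]
      constructor
      · rintro (h | h)
        · exact absurd (by simpa using h) (by simpa [Prod.ext_iff] using hxy)
        · exact h
      · exact fun h => Or.inr h
    simp [this]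

lemma ddB_eq_ddA : ddB = ddA := rfl

-- level 3 (last move): A's k-loop over the twice-marked board equals B's DFS at steps = 1
lemma loopK_eq (board b2 : List (List Int)) (V : List (Int × Int))
    (hrel : RelV board V b2) (r2 c2 g2 : Int) (ds : List (Int × Int)) :
    loopK b2 r2 c2 g2 ds = dfsB board 1 r2 c2 g2 V ds := by
  induction ds with
  | nil => simp [loopK, dfsB]
  | cons d ds ih =>
    obtain ⟨dr, dc⟩ := d
    rw [loopK, dfsB]
    simp only [show cellB = cellA from rfl]
    by_cases hg : 0 ≤ r2 + dr ∧ r2 + dr < 5 ∧ 0 ≤ c2 + dc ∧ c2 + dc < 5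
    · obtain ⟨h1, h2, h3, h4⟩ := hg
      have hcell := hrel (r2 + dr) (c2 + dc) h1 h2 h3 h4
      by_cases hv : (r2 + dr, c2 + dc) ∈ V
      · rw [if_pos (Or.inr (by rw [hcell, if_pos hv]))]
        rw [if_neg (by push_neg; intro _ _ _ _ _; exact hv)]
        exact ih
      · by_cases hm1 : cellA board (r2 + dr) (c2 + dc) = -1
        · rw [if_pos (Or.inr (by rw [hcell, if_neg hv]; exact hm1))]
          rw [if_neg (by push_neg; intro _ _ _ _ h; exact absurd hm1 h)]
          exact ih
        · rw [if_neg (by push_neg; exact ⟨⟨h1, h2, h3, h4⟩, by rw [hcell, if_neg hv]; exact hm1⟩)]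
          have hcond : 0 ≤ r2 + dr ∧ r2 + dr < 5 ∧ 0 ≤ c2 + dc ∧ c2 + dc < 5 ∧
              cellA board (r2 + dr) (c2 + dc) ≠ -1 ∧ ¬ ((r2 + dr, c2 + dc) ∈ V) :=
            ⟨h1, h2, h3, h4, hm1, hv⟩
          rw [if_pos hcond, hcell, if_neg hv]
          by_cases hge : 2 ≤ g2 + (if cellA board (r2 + dr) (c2 + dc) = 1 then 1 else 0)
          · simp only [if_pos hge]
          · simp only [if_neg hge]
            rw [dif_neg (by omega)]
            exact ih
    · rw [if_pos (Or.inl hg)]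
      rw [if_neg (by push_neg; intro h1 h2 h3 h4; exact absurd ⟨h1, h2, h3, h4⟩ hg)]
      exact ih

-- level 2: A's j-loop over the once-marked board equals B's DFS at steps = 2
lemma loopJ_eq (board b1 : List (List Int)) (V : List (Int × Int))
    (hb1 : ShapeOK b1) (hrel : RelV board V b1)
    (r1 c1 g1 : Int) (hr1 : 0 ≤ r1 ∧ r1 < 5) (hc1 : 0 ≤ c1 ∧ c1 < 5)
    (ds : List (Int × Int)) :
    loopJ b1 r1 c1 g1 ds = dfsB board 2 r1 c1 g1 V ds := by
  induction ds with
  | nil => simp [loopJ, dfsB]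
  | cons d ds ih =>
    obtain ⟨dr, dc⟩ := d
    rw [loopJ, dfsB]
    simp only [show cellB = cellA from rfl]
    by_cases hg : 0 ≤ r1 + dr ∧ r1 + dr < 5 ∧ 0 ≤ c1 + dc ∧ c1 + dc < 5
    · obtain ⟨h1, h2, h3, h4⟩ := hg
      have hcell := hrel (r1 + dr) (c1 + dc) h1 h2 h3 h4
      by_cases hv : (r1 + dr, c1 + dc) ∈ V
      · rw [if_pos (Or.inr (by rw [hcell, if_pos hv]))]
        rw [if_neg (by push_neg; intro _ _ _ _ _; exact hv)]
        exact ih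
      · by_cases hm1 : cellA board (r1 + dr) (c1 + dc) = -1
        · rw [if_pos (Or.inr (by rw [hcell, if_neg hv]; exact hm1))]
          rw [if_neg (by push_neg; intro _ _ _ _ h; exact absurd hm1 h)]
          exact ih
        · rw [if_neg (by push_neg; exact ⟨⟨h1, h2, h3, h4⟩, by rw [hcell, if_neg hv]; exact hm1⟩)]
          have hcond : 0 ≤ r1 + dr ∧ r1 + dr < 5 ∧ 0 ≤ c1 + dc ∧ c1 + dc < 5 ∧
              cellA board (r1 + dr) (c1 + dc) ≠ -1 ∧ ¬ ((r1 + dr, c1 + dc) ∈ V) :=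
            ⟨h1, h2, h3, h4, hm1, hv⟩
          have hrel' : RelV board ((r1, c1) :: V) (setCellA b1 r1 c1 (-1)) :=
            relV_set board V b1 hb1 hrel r1 c1 hr1.1 hr1.2 hc1.1 hc1.2
          rw [if_pos hcond, hcell, if_neg hv]
          by_cases hge : 2 ≤ g1 + (if cellA board (r1 + dr) (c1 + dc) = 1 then 1 else 0)
          · simp only [if_pos hge]
          · simp only [if_neg hge]
            rw [dif_pos (by omega), show (2 : Nat) - 1 = 1 from rfl, ← ddB_eq_ddA,
              loopK_eq board (setCellA b1 r1 c1 (-1)) ((r1, c1) :: V) hrel'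
              (r1 + dr) (c1 + dc) (g1 + (if cellA board (r1 + dr) (c1 + dc) = 1 then 1 else 0)) ddB]
            rw [ih]
    · rw [if_pos (Or.inl hg)]
      rw [if_neg (by push_neg; intro h1 h2 h3 h4; exact absurd ⟨h1, h2, h3, h4⟩ hg)]
      exact ih

-- level 1: A's i-loop over the original board equals B's DFS at steps = 3
lemma loopI_eq (board : List (List Int)) (hboard : ShapeOK board) (r c : Int)
    (hr : 0 ≤ r ∧ r < 5) (hc : 0 ≤ c ∧ c < 5) (ds : List (Int × Int)) :
    loopI board r c ds = dfsB board 3 r c 0 [] ds := by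
  induction ds with
  | nil => simp [loopI, dfsB]
  | cons d ds ih =>
    obtain ⟨dr, dc⟩ := d
    rw [loopI, dfsB]
    simp only [show cellB = cellA from rfl]
    by_cases hg : 0 ≤ r + dr ∧ r + dr < 5 ∧ 0 ≤ c + dc ∧ c + dc < 5
    · obtain ⟨h1, h2, h3, h4⟩ := hg
      by_cases hm1 : cellA board (r + dr) (c + dc) = -1
      · rw [if_pos (Or.inr hm1)]
        rw [if_neg (by push_neg; intro _ _ _ _ h; exact absurd hm1 h)]
        exact ih
      · rw [if_neg (by push_neg; exact ⟨⟨h1, h2, h3, h4⟩, hm1⟩)]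
        have hcond : 0 ≤ r + dr ∧ r + dr < 5 ∧ 0 ≤ c + dc ∧ c + dc < 5 ∧
            cellA board (r + dr) (c + dc) ≠ -1 ∧ ¬ ((r + dr, c + dc) ∈ ([] : List (Int × Int))) :=
          ⟨h1, h2, h3, h4, hm1, by simp⟩
        have hna : ¬ 2 ≤ (0 : Int) + (if cellA board (r + dr) (c + dc) = 1 then 1 else 0) := by
          split <;> omega
        rw [if_pos hcond, if_neg hna, dif_pos (by omega)]
        rw [show (3 : Nat) - 1 = 2 from rfl]
        have hrel' : RelV board [(r, c)] (setCellA board r c (-1)) :=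
          relV_set board [] board hboard (relV_nil board) r c hr.1 hr.2 hc.1 hc.2
        have hzero : (0 : Int) + (if cellA board (r + dr) (c + dc) = 1 then 1 else 0) =
            (if cellA board (r + dr) (c + dc) = 1 then 1 else 0) := by omega
        rw [hzero, ← ddB_eq_ddA,
          loopJ_eq board (setCellA board r c (-1)) [(r, c)]
          (shape_set board r c (-1) hr.1 hr.2 hboard) hrel' (r + dr) (c + dc)
          (if cellA board (r + dr) (c + dc) = 1 then 1 else 0) ⟨h1, h2⟩ ⟨h3, h4⟩ ddB]
        rw [ih]
    · rw [if_pos (Or.inl hg)]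
      rw [if_neg (by push_neg; intro h1 h2 h3 h4; exact absurd ⟨h1, h2, h3, h4⟩ hg)]
      exact ih

-- far-out starts: both sides scan the four directions, reject each on bounds, return 0
lemma loopI_far (board : List (List Int)) (r c : Int) (l : List (Int × Int))
    (h : ∀ d ∈ l, ¬(0 ≤ r + d.1 ∧ r + d.1 < 5 ∧ 0 ≤ c + d.2 ∧ c + d.2 < 5)) :
    loopI board r c l = false := by
  induction l with
  | nil => rw [loopI]
  | cons d t ih =>
    obtain ⟨dr, dc⟩ := d
    rw [loopI, if_pos (Or.inl (h (dr, dc) List.mem_cons_self))]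
    exact ih fun d hd => h d (List.mem_cons_of_mem _ hd)

lemma dfsB_far (board : List (List Int)) (steps : Nat) (r c apples : Int)
    (visited : List (Int × Int)) (l : List (Int × Int))
    (h : ∀ d ∈ l, ¬(0 ≤ r + d.1 ∧ r + d.1 < 5 ∧ 0 ≤ c + d.2 ∧ c + d.2 < 5)) :
    dfsB board steps r c apples visited l = false := by
  induction l with
  | nil => rw [dfsB]
  | cons d t ih =>
    obtain ⟨dr, dc⟩ := d
    rw [dfsB, if_neg (by
      have := h (dr, dc) List.mem_cons_self
      push_neg at this ⊢
      intro a1 a2 a3 a4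
      exact absurd a4 (by have h5 := this a1 a2 a3; simp at h5; omega))]
    exact ih fun d hd => h d (List.mem_cons_of_mem _ hd)

-- far-out starts: both sides scan the four directions, reject each on bounds, return 0
lemma far_out (board : List (List Int)) (r c : Int)
    (h : ¬(0 ≤ r - 1 ∧ r - 1 < 5 ∧ 0 ≤ c ∧ c < 5) ∧ ¬(0 ≤ r + 1 ∧ r + 1 < 5 ∧ 0 ≤ c ∧ c < 5)
     ∧ ¬(0 ≤ r ∧ r < 5 ∧ 0 ≤ c - 1 ∧ c - 1 < 5) ∧ ¬(0 ≤ r ∧ r < 5 ∧ 0 ≤ c + 1 ∧ c + 1 < 5)) :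
    solution board r c = solution_alt board r c := by
  obtain ⟨h1, h2, h3, h4⟩ := h
  unfold solution solution_alt
  rw [loopI_far board r c ddA (by intro d hd; fin_cases hd <;> simp <;> omega),
    dfsB_far board 3 r c 0 [] ddB (by intro d hd; fin_cases hd <;> simp <;> omega)]

-- ===== VERDICT (by name: the statement is the Claim_ definition above) =====
theorem solution_spec : Claim_equal_solution := by
  intro board r c _ hpre
  unfold Spec_solution
  rcases hpre with ⟨hr0, hr5, hc0, hc5, hlen, hrows⟩ | hfar
  · have hshape : ShapeOK board := by
      refine ⟨hlen, fun k hk => ?_⟩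
      have hkb : k < board.length := by omega
      have hmem : board[k] ∈ board.take 5 := by
        have h5 : k < (board.take 5).length := by simp [List.length_take]; omega
        have hm := List.getElem_mem h5
        rwa [List.getElem_take] at hm
      have := hrows _ hmem
      rw [List.getD_eq_getElem?_getD, List.getElem?_eq_getElem hkb]
      simpa using this
    have h := loopI_eq board hshape r c ⟨hr0, hr5⟩ ⟨hc0, hc5⟩ ddA
    unfold solution solution_alt
    rw [h, ddB_eq_ddA]
  · exact far_out board r c hfar
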